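-- pv_equiv track=rewrite | github.com/inmonim/algo | 백준/실버/11279_최대 힙/최대힙.py | h_push
-- ===== SOURCE A (Python) =====
-- def h_push(Q, n):
--     Q.append(n)
--     i = len(Q) - 1
--
--     while i > 1:
--         if Q[i] >= Q[i//2]:
--             Q[i], Q[i//2] = Q[i//2], Q[i]
--             i = i//2
--         else:
--             break
--     return Q
-- ===== SOURCE B (Python) =====
-- def h_push(Q, n):
--     i = len(Q)
--     Q.append(n)
--     # stage 1: collect the ancestor chain of the new slot (bottom-up)
--     path = []
--     j = i
--     while j > 1:
--         j //= 2
--         path.append(j)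
--     vals = [Q[p] for p in path]
--     # stage 2: how many ancestors n climbs past
--     k = 0
--     while k < len(vals) and n >= vals[k]:
--         k += 1
--     # stage 3: new contents of the chain = vals with n inserted at depth k; write back
--     new_vals = vals[:k] + [n] + vals[k:]
--     for p, v in zip([i] + path, new_vals):
--         Q[p] = v
--     return Q
-- ===== Notes on version B (the rewrite author's own statement) =====
-- stated objective: alternative
-- what changed: B separates the sift-up into staged passes: it first materialises the ancestor chain of the new slot as a list, reads its values, computes in a pure comparison pass how many ancestors n climbs past, builds the chain's new contents as a list insertion (vals[:k] + [n] + vals[k:]), and finally writes the chain back, instead of A's interleaved compare-and-swap loop.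
import Mathlib
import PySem

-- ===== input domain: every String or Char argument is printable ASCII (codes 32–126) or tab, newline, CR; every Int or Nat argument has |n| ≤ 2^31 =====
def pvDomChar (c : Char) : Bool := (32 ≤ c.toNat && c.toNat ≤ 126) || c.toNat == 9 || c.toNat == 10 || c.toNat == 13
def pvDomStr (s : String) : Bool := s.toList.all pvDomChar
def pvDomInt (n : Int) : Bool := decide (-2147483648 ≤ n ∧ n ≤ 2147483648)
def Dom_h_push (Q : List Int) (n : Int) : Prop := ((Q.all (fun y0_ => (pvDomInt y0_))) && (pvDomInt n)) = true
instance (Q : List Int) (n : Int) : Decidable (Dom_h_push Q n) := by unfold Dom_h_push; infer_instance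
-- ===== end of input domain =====

-- B replaces A's interleaved compare-and-swap sift-up by staged passes (materialise the ancestor
-- chain, count how far n climbs, insert n into the chain list, write the chain back);
-- both Pythons mutate Q in place identically — the equivalence proved here is about the return value.

-- ===== PORT A =====
-- A's while loop: i > 1, swap Q[i] with Q[i//2] while Q[i] >= Q[i//2]; indices are always in range,
-- so Python's Q[i] is ported as getD (exact here).
def h_push_loopA (Q : List Int) (i : Nat) : List Int :=
  if i > 1 then
    let qi := Q.getD i 0
    let qp := Q.getD (i / 2) 0
    if qi ≥ qp then h_push_loopA ((Q.set i qp).set (i / 2) qi) (i / 2)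
    else Q
  else Q
termination_by i
decreasing_by omega

def h_push (Q : List Int) (n : Int) : List Int :=
  h_push_loopA (Q ++ [n]) ((Q ++ [n]).length - 1)

-- ===== PORT B =====
-- stage 1 loop of Source B: while j > 1: j //= 2; path.append(j)
def h_push_path (j : Nat) : List Nat :=
  if j > 1 then (j / 2) :: h_push_path (j / 2) else []
termination_by j
decreasing_by omega

-- stage 2 loop of Source B: while k < len(vals) and n >= vals[k]: k += 1
def h_push_count (n : Int) : List Int → Nat
  | [] => 0
  | v :: t => if n ≥ v then h_push_count n t + 1 else 0

-- stage 3 loop of Source B: for p, v in zip([i] + path, new_vals): Q[p] = v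
def h_push_write (Q : List Int) (pvs : List (Nat × Int)) : List Int :=
  pvs.foldl (fun Q pv => Q.set pv.1 pv.2) Q

def h_push_alt (Q : List Int) (n : Int) : List Int :=
  let i := Q.length
  let Q1 := Q ++ [n]
  let path := h_push_path i
  let vals := path.map (fun p => Q1.getD p 0)
  let k := h_push_count n vals
  let newVals := vals.take k ++ [n] ++ vals.drop k
  h_push_write Q1 (List.zip (i :: path) newVals)

-- ===== PRECONDITION & SPEC =====
def Spec_h_push (Q : List Int) (n : Int) (out : List Int) : Prop := out = h_push_alt Q n
instance (Q : List Int) (n : Int) (out : List Int) : Decidable (Spec_h_push Q n out) := by unfold Spec_h_push; infer_instance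

-- ===== CLAIM (what is proved, stated in full; the proofs are below) =====
def Claim_equal_h_push : Prop := ∀ (Q : List Int) (n : Int), Dom_h_push Q n → Spec_h_push Q n (h_push Q n)

-- ===== LEMMAS AND PROOFS =====

-- Proof-side intermediate: sift-up as hole percolation (n held out of the array).
def holeLoop (Q : List Int) (n : Int) (i : Nat) : List Int :=
  if i > 1 then
    let qp := Q.getD (i / 2) 0
    if n ≥ qp then holeLoop (Q.set i qp) n (i / 2)
    else Q.set i n
  else Q.set i n
termination_by i
decreasing_by omega

-- A's swap loop equals hole percolation when n sits at the hole.
theorem loopA_eq_holeLoop (n : Int) : ∀ (i : Nat) (Q : List Int), i < Q.length →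
    h_push_loopA (Q.set i n) i = holeLoop Q n i := by
  intro i
  induction i using Nat.strong_induction_on with
  | _ i ih =>
    intro Q hlen
    rw [h_push_loopA, holeLoop]
    by_cases h1 : i > 1
    · simp only [h1, if_pos]
      have hqi : (Q.set i n).getD i 0 = n := by
        simp [List.getD_eq_getElem?_getD, hlen]
      have hqp : (Q.set i n).getD (i / 2) 0 = Q.getD (i / 2) 0 := by
        simp [List.getD_eq_getElem?_getD, List.getElem?_set_ne (by omega : i ≠ i / 2)]
      rw [hqi, hqp]
      by_cases hc : n ≥ Q.getD (i / 2) 0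
      · simp only [hc, if_pos]
        have : (Q.set i n).set i (Q.getD (i / 2) 0) = Q.set i (Q.getD (i / 2) 0) := by
          simp [List.set_set]
        rw [this]
        exact ih (i / 2) (by omega) (Q.set i (Q.getD (i / 2) 0)) (by simpa using by omega)
      · rw [if_neg hc, if_neg hc]
    · simp [h1]

theorem set_append_last (Q : List Int) (n m : Int) :
    (Q ++ [n]).set Q.length m = Q ++ [m] := by
  induction Q with
  | nil => rfl
  | cons a t ih => simp [ih]

theorem path_lt : ∀ (j : Nat), ∀ p ∈ h_push_path j, p < j := by
  intro j
  induction j using Nat.strong_induction_on with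
  | _ j ih =>
    intro p hp
    rw [h_push_path] at hp
    by_cases h1 : j > 1
    · simp only [h1, if_pos, List.mem_cons] at hp
      rcases hp with h | h
      · omega
      · have := ih (j / 2) (by omega) p h; omega
    · simp [h1] at hp

theorem getD_set_ne (Q : List Int) (i p : Nat) (v : Int) (h : p ≠ i) :
    (Q.set i v).getD p 0 = Q.getD p 0 := by
  simp [List.getD_eq_getElem?_getD, List.getElem?_set_ne (by omega : i ≠ p)]

theorem set_getD_self (Q : List Int) (p : Nat) : Q.set p (Q.getD p 0) = Q := by
  by_cases h : p < Q.length
  · apply List.ext_getElem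
    · simp
    · intro j hj hj'
      rw [List.getElem_set]
      split
      · next he => subst he; simp [List.getD_eq_getElem?_getD, h]
      · rfl
  · exact List.set_eq_of_length_le (by omega)

-- Write-back of a chain's own values is the identity.
theorem write_id : ∀ (path : List Nat) (Q : List Int),
    h_push_write Q (List.zip path (path.map (fun p => Q.getD p 0))) = Q := by
  intro path
  induction path with
  | nil => intro Q; rfl
  | cons p t ih =>
    intro Q
    simp only [List.map_cons, List.zip_cons_cons, h_push_write, List.foldl_cons]
    rw [show Q.set p (Q.getD p 0) = Q from set_getD_self Q p]
    exact ih Q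

-- Hole percolation equals B's staged construction.
theorem holeLoop_eq_staged (n : Int) : ∀ (i : Nat) (Q : List Int),
    holeLoop Q n i =
      h_push_write Q (List.zip (i :: h_push_path i)
        ((((h_push_path i).map (fun p => Q.getD p 0)).take
            (h_push_count n ((h_push_path i).map (fun p => Q.getD p 0))) ++ [n]) ++
          ((h_push_path i).map (fun p => Q.getD p 0)).drop
            (h_push_count n ((h_push_path i).map (fun p => Q.getD p 0))))) := by
  intro i
  induction i using Nat.strong_induction_on with
  | _ i ih =>
    intro Q
    rw [holeLoop, h_push_path]
    by_cases h1 : i > 1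
    · simp only [h1, if_pos]
      set qp := Q.getD (i / 2) 0 with hqp
      have hmem : ∀ p ∈ h_push_path (i / 2), p < i := by
        intro p hp
        have := path_lt (i / 2) p hp; omega
      by_cases hc : n ≥ qp
      · simp only [hc, if_pos]
        rw [ih (i / 2) (by omega) (Q.set i qp)]
        have hv : (h_push_path (i / 2)).map (fun p => (Q.set i qp).getD p 0)
            = (h_push_path (i / 2)).map (fun p => Q.getD p 0) := by
          apply List.map_congr_left
          intro p hp
          exact getD_set_ne Q i p qp (by have := hmem p hp; omega)
        rw [hv]
        simp only [List.map_cons, h_push_count, hc, if_pos, ← hqp]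
        simp only [List.take_succ_cons, List.drop_succ_cons, List.cons_append,
          List.zip_cons_cons, h_push_write, List.foldl_cons]
      · simp only [hc, if_neg, not_false_iff]
        simp only [List.map_cons, h_push_count, hc, if_neg, not_false_iff, ← hqp]
        simp only [List.take_zero, List.drop_zero, List.nil_append, List.cons_append,
          List.zip_cons_cons, h_push_write, List.foldl_cons]
        have hv : ((i / 2) :: h_push_path (i / 2)).map (fun p => Q.getD p 0)
            = ((i / 2) :: h_push_path (i / 2)).map (fun p => (Q.set i n).getD p 0) := by
          apply List.map_congr_left
          intro p hp
          rcases List.mem_cons.mp hp with h | h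
          · subst h; exact (getD_set_ne Q i _ n (by omega)).symm
          · exact (getD_set_ne Q i p n (by have := hmem p h; omega)).symm
        calc Q.set i n
            = h_push_write (Q.set i n) (List.zip ((i / 2) :: h_push_path (i / 2))
                (((i / 2) :: h_push_path (i / 2)).map (fun p => (Q.set i n).getD p 0))) := by
              rw [write_id]
          _ = _ := by rw [← hv]; simp [h_push_write, List.getD_eq_getElem?_getD, hqp]
    · simp [h1, h_push_count, h_push_write]

-- ===== VERDICT (by name: the statement is the Claim_ definition above) =====
theorem h_push_spec : Claim_equal_h_push := by
  unfold Claim_equal_h_push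
  intro Q n _
  unfold Spec_h_push h_push h_push_alt
  have hlen : (Q ++ [n]).length - 1 = Q.length := by simp
  rw [hlen]
  have h := loopA_eq_holeLoop n Q.length (Q ++ [n]) (by simp)
  rw [set_append_last] at h
  rw [h, holeLoop_eq_staged]
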